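-- pv_equiv track=rewrite | github.com/sjrgame/shijingrong | Protocol/nwlyzd.py | point
-- ===== SOURCE A (Python) =====
-- def point(data):
--     strvalue = ''
--     if data[0:4] == '0000':
--         strvalue += str(int(data, 16))
--         return strvalue
--     else:
--         data1 = transto2(data[0:2])
--         data2 = data1[::-1]
--         fa = ''
-- #        G = ''
--         for j in range(0, 8):
--             if data2[j] == '1':
--                 dd = j + 1
--                 ee = str(dd)
--                 fa += ''.join(ee)
--         for xp in range(0, len(fa)):
--             strvalue += str((int(data[2:4], 16)-1)*8 + int(fa[xp], 16)) + ','
--         return strvalue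
--
-- def transto2(data):
--     StrValue =''
--     for i in range(len(data)):
--         aa=bin(int(data[i],16))
--         aa=aa.zfill(6)
--         aa=aa.replace('0b','')
--         StrValue +=''.join(aa)
--     return  StrValue
-- ===== SOURCE B (Python) =====
-- def point(data):
--     if data[0:4] == '0000':
--         return str(int(data, 16))
--     byte1 = int(data[0:2], 16)
--     out = ''
--     for j in range(8):
--         if byte1 >> j & 1:
--             out += str((int(data[2:4], 16) - 1) * 8 + j + 1) + ','
--     return out
-- ===== Notes on version B (the rewrite author's own statement) =====
-- stated objective: simpler
-- what changed: Replaces transto2's per-digit bin()/zfill/replace binary-string construction, the string reversal and the two collection loops by a single loop over the 8 bit positions of the parsed first byte, testing each bit with a shift-and-mask and emitting the point number directly (data[2:4] is still only parsed when a bit is set).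
import Mathlib
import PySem

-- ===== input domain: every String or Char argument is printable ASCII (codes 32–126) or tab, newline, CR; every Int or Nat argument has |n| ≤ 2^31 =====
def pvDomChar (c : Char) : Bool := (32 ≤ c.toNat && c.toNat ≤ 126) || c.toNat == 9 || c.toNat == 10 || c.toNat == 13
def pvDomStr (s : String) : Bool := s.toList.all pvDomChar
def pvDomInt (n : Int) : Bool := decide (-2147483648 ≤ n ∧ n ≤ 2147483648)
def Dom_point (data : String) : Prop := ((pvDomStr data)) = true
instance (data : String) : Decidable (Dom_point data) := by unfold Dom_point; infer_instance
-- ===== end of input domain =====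

-- B replaces A's binary-string/reverse machinery (transto2) by a direct bit test on the parsed
-- first byte: simpler, one loop instead of three passes over intermediate strings.

-- ===== PORT A =====

-- aa = bin(int(data[i],16)); aa = aa.zfill(6); aa = aa.replace('0b','')
def pvT2Step (c : Char) : List Char :=
  PySem.Chars.replace
    (PySem.Chars.zfill (PySem.Int.toBinChars0b ((PySem.Int.ofCharsBase? [c] 16).getD 0)) 6)
    ['0', 'b'] []

-- transto2: for i in range(len(data)): StrValue += ''.join(aa)
def transto2 (cs : List Char) : List Char :=
  (PySem.List.pyRange 0 (PySem.List.len cs) 1).foldl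
    (fun sv i => sv ++ pvT2Step (PySem.List.pyGetD cs i ' ')) []

def point (data : String) : String :=
  let cs := data.toList
  if PySem.List.slice cs (some 0) (some 4) = ['0', '0', '0', '0'] then
    -- strvalue += str(int(data, 16))
    String.ofList (PySem.Int.toChars ((PySem.Int.ofCharsBase? cs 16).getD 0))
  else
    let data1 := transto2 (PySem.List.slice cs (some 0) (some 2))
    let data2 := (PySem.List.slice? data1 none none (-1)).getD []   -- data1[::-1]
    let fa := (PySem.List.pyRange 0 8 1).foldl
      (fun fa j =>
        if PySem.List.pyGetD data2 j ' ' = '1' then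
          fa ++ PySem.Int.toChars (j + 1)          -- dd = j+1; ee = str(dd); fa += ''.join(ee)
        else fa) []
    let strvalue := (PySem.List.pyRange 0 (PySem.List.len fa) 1).foldl
      (fun sv xp =>
        sv ++ (PySem.Int.toChars
                (((PySem.Int.ofCharsBase? (PySem.List.slice cs (some 2) (some 4)) 16).getD 0 - 1) * 8
                  + (PySem.Int.ofCharsBase? [PySem.List.pyGetD fa xp ' '] 16).getD 0)
               ++ [','])) []
    String.ofList strvalue

-- ===== PORT B =====

def point_alt (data : String) : String :=
  let cs := data.toList
  if PySem.List.slice cs (some 0) (some 4) = ['0', '0', '0', '0'] then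
    String.ofList (PySem.Int.toChars ((PySem.Int.ofCharsBase? cs 16).getD 0))
  else
    let byte1 := (PySem.Int.ofCharsBase? (PySem.List.slice cs (some 0) (some 2)) 16).getD 0
    let out := (PySem.List.pyRange 0 8 1).foldl
      (fun out j =>
        if PySem.Int.band (byte1 >>> j.toNat) 1 ≠ 0 then   -- if byte1 >> j & 1:
          out ++ (PySem.Int.toChars
                   (((PySem.Int.ofCharsBase? (PySem.List.slice cs (some 2) (some 4)) 16).getD 0 - 1) * 8
                     + j + 1)
                  ++ [','])
        else out) []
    String.ofList out

-- ===== PRECONDITION & SPEC =====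

def hexDigits : List Char :=
  ['0','1','2','3','4','5','6','7','8','9','a','b','c','d','e','f','A','B','C','D','E','F']

-- Pre_point holds exactly where A returns: in the first branch (all-zero four-char prefix) int(data,16) must parse, otherwise
-- the first two characters must be hex digits (else transto2/int raises or data2 is too short) and,
-- unless the first byte is zero (fa empty), int(data[2:4],16) must parse.
def Pre_point (data : String) : Prop :=
  let cs := data.toList
  if cs.take 4 = ['0', '0', '0', '0'] then
    (PySem.Int.ofCharsBase? cs 16).isSome = true
  else
    2 ≤ cs.length ∧ cs.getD 0 ' ' ∈ hexDigits ∧ cs.getD 1 ' ' ∈ hexDigits ∧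
      ((cs.getD 0 ' ' = '0' ∧ cs.getD 1 ' ' = '0') ∨
        (PySem.Int.ofCharsBase? ((cs.drop 2).take 2) 16).isSome = true)

instance (data : String) : Decidable (Pre_point data) := by unfold Pre_point; infer_instance

def pvWitness_point : String := "ff01"

def Spec_point (data : String) (out : String) : Prop := out = point_alt data
instance (data : String) (out : String) : Decidable (Spec_point data out) := by
  unfold Spec_point; infer_instance

-- ===== CLAIM (what is proved, stated in full; the proofs are below) =====

-- ===== CLAIM (what is proved, stated in full; the proofs are below) =====
def Claim_equal_point : Prop :=
  ∀ (data : String), Dom_point data → Pre_point data → Spec_point data (point data)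

-- ===== LEMMAS AND PROOFS =====

def hv (c : Char) : Nat :=
  if c.toNat ≤ 57 then c.toNat - 48 else if 97 ≤ c.toNat then c.toNat - 87 else c.toNat - 55

theorem hex_char_facts : ∀ c ∈ hexDigits,
    PySem.Int.ofCharsBase? [c] 16 = some (hv c) ∧ hv c < 16 ∧
    pvT2Step c = (List.range 4).map (fun k => if (hv c).testBit (3 - k) then '1' else '0') := by
  intro c hc
  fin_cases hc <;> refine ⟨by decide, by decide, by decide⟩
theorem bits_pair : ∀ v0 < 16, ∀ v1 < 16,
    (((List.range 4).map (fun k => if Nat.testBit v0 (3 - k) then '1' else '0')) ++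
      ((List.range 4).map (fun k => if Nat.testBit v1 (3 - k) then '1' else '0'))).reverse
    = (List.range 8).map (fun j => if Nat.testBit (v0 * 16 + v1) j then '1' else '0') := by
  intro v0 h0 v1 h1
  interval_cases v0 <;> interval_cases v1 <;> decide

theorem hex_pair_parse : ∀ c0 ∈ hexDigits, ∀ c1 ∈ hexDigits,
    PySem.Int.ofCharsBase? [c0, c1] 16 = some ((hv c0 * 16 + hv c1 : Nat) : Int) := by
  intro c0 hc0 c1 hc1
  fin_cases hc0 <;> fin_cases hc1 <;> decide

theorem digit_facts : ∀ k : Nat, k < 8 →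
    PySem.Int.toChars ((k : Int) + 1) = [Char.ofNat (49 + k)] ∧
    PySem.Int.ofCharsBase? [Char.ofNat (49 + k)] 16 = some ((k : Int) + 1) := by
  intro k hk
  interval_cases k <;> exact ⟨by decide, by decide⟩
theorem flatMap_congr_mem {α β : Type} (l : List α) (f g : α → List β)
    (h : ∀ x ∈ l, f x = g x) : l.flatMap f = l.flatMap g := by
  induction l with
  | nil => rfl
  | cons x xs ih =>
    simp only [List.flatMap_cons, h x (List.mem_cons_self), ih (fun y hy => h y (List.mem_cons_of_mem _ hy))]

theorem shift_band_iff (n k : Nat) :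
    (PySem.Int.band ((n : Int) >>> ((k : Nat) : Int)) 1 ≠ 0) ↔ n.testBit k = true := by
  have h1 : ((n : Int) >>> ((k : Nat) : Int)) = ((n >>> k : Nat) : Int) := by
    simp [Nat.shiftRight_eq_div_pow]
  rw [h1]
  have h2 : PySem.Int.band ((n >>> k : Nat) : Int) 1 = (((n >>> k) &&& 1 : Nat) : Int) := by
    exact_mod_cast PySem.Int.band_natCast (n >>> k) 1
  rw [h2]
  rw [Nat.testBit, Nat.and_one_is_mod]
  constructor
  · intro h
    have : (n >>> k) % 2 ≠ 0 := by exact_mod_cast h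
    simp at this ⊢
    omega
  · intro h
    simp at h
    intro hc
    have : (n >>> k) % 2 = 0 := by exact_mod_cast hc
    omega
-- ===== VERDICT (by name: the statement is the Claim_ definition above) =====
theorem point_spec : Claim_equal_point := by
  intro data _hdom hpre
  unfold Spec_point point point_alt
  by_cases h4 : PySem.List.slice data.toList (some 0) (some 4) = ['0', '0', '0', '0']
  · simp only [h4, if_pos]
  · rw [if_neg h4, if_neg h4]
    have hsl4 : PySem.List.slice data.toList (some 0) (some 4) = data.toList.take 4 := by
      simp [pysem]
    rw [Pre_point] at hpre
    simp only [hsl4] at h4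
    rw [if_neg h4] at hpre
    obtain ⟨hlen, hx0, hx1, -⟩ := hpre
    match hcs : data.toList, hlen with
    | c0 :: c1 :: rest, _ =>
    simp only [hcs, List.getD] at hx0 hx1
    obtain ⟨hp0, hl0, ht0⟩ := hex_char_facts c0 hx0
    obtain ⟨hp1, hl1, ht1⟩ := hex_char_facts c1 hx1
    have hsl2 : PySem.List.slice (c0 :: c1 :: rest) (some 0) (some 2) = [c0, c1] := by
      simp [pysem]
    have hr01 : PySem.List.pyRange 0 2 1 = [0, 1] := by decide
    have hg1 : PySem.List.pyGetD [c0, c1] 0 ' ' = c0 := by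
      simp [PySem.List.pyGetD, PySem.List.pyGet?, PySem.List.pyIdx?]
    have hg2 : PySem.List.pyGetD [c0, c1] 1 ' ' = c1 := by
      simp [PySem.List.pyGetD, PySem.List.pyGet?, PySem.List.pyIdx?]
    have htt : transto2 [c0, c1] = pvT2Step c0 ++ pvT2Step c1 := by
      rw [transto2]
      rw [show PySem.List.len [c0, c1] = 2 from by simp [pysem]]
      rw [hr01]
      simp only [List.foldl_cons, List.foldl_nil, hg1, hg2, List.nil_append]
    have hdata2 : (PySem.List.slice? (transto2 [c0, c1]) none none (-1)).getD []
        = (List.range 8).map (fun j => if Nat.testBit (hv c0 * 16 + hv c1) j then '1' else '0') := by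
      rw [PySem.List.slice?_none_none_neg_one, Option.getD_some, htt, ht0, ht1]
      exact bits_pair (hv c0) hl0 (hv c1) hl1
    dsimp only
    rw [hsl2, hdata2, hex_pair_parse c0 hx0 c1 hx1, Option.getD_some]
    set n : Nat := hv c0 * 16 + hv c1 with hn
    set C : Int := (PySem.Int.ofCharsBase? (PySem.List.slice (c0 :: c1 :: rest) (some 2) (some 4)) 16).getD 0 - 1 with hC
    have hfa : List.foldl
        (fun fa j => if PySem.List.pyGetD (List.map (fun j => if n.testBit j = true then '1' else '0') (List.range 8)) j ' ' = '1' then fa ++ PySem.Int.toChars (j + 1) else fa)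
        [] (PySem.List.pyRange 0 8 1)
        = ((PySem.List.pyRange 0 8 1).filter (fun j => n.testBit j.toNat)).flatMap (fun j => PySem.Int.toChars (j + 1)) := by
      have hcongr := PySem.List.foldl_congr_mem (l := PySem.List.pyRange 0 8 1)
        (f := fun fa j => if PySem.List.pyGetD (List.map (fun j => if n.testBit j = true then '1' else '0') (List.range 8)) j ' ' = '1' then fa ++ PySem.Int.toChars (j + 1) else fa)
        (g := fun fa j => if n.testBit j.toNat = true then fa ++ PySem.Int.toChars (j + 1) else fa)
        (init := []) ?_
      · rw [hcongr, PySem.List.foldl_if_eq_foldl_filter, PySem.List.foldl_append_eq_flatMap]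
        simp
      · intro acc j hj
        obtain ⟨hj0, hj8⟩ := (PySem.List.mem_pyRange_one).mp hj
        have hjl : j.toNat < 8 := by omega
        have hgd : PySem.List.pyGetD (List.map (fun j => if n.testBit j = true then '1' else '0') (List.range 8)) j ' '
            = (if n.testBit j.toNat then '1' else '0') := by
          rw [PySem.List.pyGetD_eq_getElem _ ' ' hj0 (by simp; omega)]
          simp
        dsimp only
        rw [hgd]
        by_cases hb : n.testBit j.toNat <;> simp [hb]
    rw [hfa]
    rw [PySem.List.foldl_pyRange_zero_pyGetD _ ' '
      (fun sv ch => sv ++ (PySem.Int.toChars (C * 8 + (PySem.Int.ofCharsBase? [ch] 16).getD 0) ++ [','])) []]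
    rw [PySem.List.foldl_append_eq_flatMap
      (fun ch => PySem.Int.toChars (C * 8 + (PySem.Int.ofCharsBase? [ch] 16).getD 0) ++ [','])]
    have hB : List.foldl
        (fun out j => if PySem.Int.band ((n : Int) >>> ((j.toNat : Nat) : Int)) 1 ≠ 0 then out ++ (PySem.Int.toChars (C * 8 + j + 1) ++ [',']) else out)
        [] (PySem.List.pyRange 0 8 1)
        = ((PySem.List.pyRange 0 8 1).filter (fun j => n.testBit j.toNat)).flatMap
            (fun j => PySem.Int.toChars (C * 8 + j + 1) ++ [',']) := by
      have hcongr := PySem.List.foldl_congr_mem (l := PySem.List.pyRange 0 8 1)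
        (f := fun out j => if PySem.Int.band ((n : Int) >>> ((j.toNat : Nat) : Int)) 1 ≠ 0 then out ++ (PySem.Int.toChars (C * 8 + j + 1) ++ [',']) else out)
        (g := fun out j => if n.testBit j.toNat = true then out ++ (PySem.Int.toChars (C * 8 + j + 1) ++ [',']) else out)
        (init := []) ?_
      · rw [hcongr, PySem.List.foldl_if_eq_foldl_filter, PySem.List.foldl_append_eq_flatMap]
        simp
      · intro acc j hj
        dsimp only
        by_cases hb : n.testBit j.toNat
        · rw [if_pos ((shift_band_iff n j.toNat).mpr hb), if_pos hb]
        · rw [if_neg (fun hc => hb ((shift_band_iff n j.toNat).mp hc)), if_neg (by simp [hb])]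
    rw [hB, List.nil_append, List.flatMap_assoc]
    apply congrArg
    apply flatMap_congr_mem
    intro j hj
    obtain ⟨hj0, hj8⟩ := (PySem.List.mem_pyRange_one).mp (List.mem_filter.mp hj).1
    have hk8 : j.toNat < 8 := by omega
    obtain ⟨hd1, hd2⟩ := digit_facts j.toNat hk8
    have hjk : ((j.toNat : Nat) : Int) = j := Int.toNat_of_nonneg hj0
    rw [hjk] at hd1 hd2
    rw [hd1, List.flatMap_singleton, hd2, Option.getD_some, ← add_assoc]
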